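-- pv_equiv track=rewrite | github.com/CSE-Courses/course-project-a6-magnum-cerebellum | invClassHelpers.py | calculateOutline
-- ===== SOURCE A (Python) =====
-- outlineList = {}
--
-- def calculateOutline(r):
--     r = int(round(r))
--     if r in outlineList:
--         return outlineList[r]
--     x, y, e = r, 0, 1 - r
--     outlineList[r] = points = []
--     while x >= y:
--         points.append((x, y))
--         y += 1
--         if e < 0:
--             e += 2 * y - 1
--         else:
--             x -= 1
--             e += 2 * (y - x) - 1
--     points += [(y, x) for x, y in points if x > y]
--     points += [(-x, y) for x, y in points if x]
--     points += [(x, -y) for x, y in points if y]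
--     points.sort()
--     return points
-- ===== SOURCE B (Python) =====
-- outlineList = {}
--
-- def calculateOutline(r):
--     r = int(round(r))
--     if r in outlineList:
--         return outlineList[r]
--     pts = []
--     x, y, e = r, 0, 1 - r
--     while x >= y:
--         pts.append((x, y))
--         y += 1
--         if e < 0:
--             e += 2 * y - 1
--         else:
--             x -= 1
--             e += 2 * (y - x) - 1
--     big = [q for (x, y) in pts
--              for q in ((x, y), (y, x), (-x, y), (x, -y),
--                        (-x, -y), (-y, x), (y, -x), (-y, -x))]
--     big.sort()
--     result = []
--     last = None
--     for p in big:
--         if p != last: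
--             result.append(p)
--             last = p
--     outlineList[r] = result
--     return result
-- ===== Notes on version B (the rewrite author's own statement) =====
-- stated objective: alternative
-- what changed: A dedups by three guarded reflection comprehensions and then sorts in place; B flattens all eight symmetric images of each octant point into one list, sorts it, and removes adjacent duplicates in a single scan.
import Mathlib
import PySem

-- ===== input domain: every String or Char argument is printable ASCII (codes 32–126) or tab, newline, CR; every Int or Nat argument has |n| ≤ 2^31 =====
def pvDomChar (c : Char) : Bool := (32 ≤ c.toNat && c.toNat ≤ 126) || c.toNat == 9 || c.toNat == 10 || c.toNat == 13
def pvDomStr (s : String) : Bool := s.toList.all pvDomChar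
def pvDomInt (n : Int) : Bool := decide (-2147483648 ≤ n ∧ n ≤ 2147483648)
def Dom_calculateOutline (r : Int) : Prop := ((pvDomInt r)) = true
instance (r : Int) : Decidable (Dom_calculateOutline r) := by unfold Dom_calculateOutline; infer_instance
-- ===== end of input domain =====

-- B replaces A's three guarded incremental reflection passes + in-place sort by sorting the set of
-- all eight symmetric images of each octant point (objective: simpler). Return-value equivalence:
-- A and B each memoise their result in their own module-level dict (same keys, same cached values).

-- ===== PORT A =====
-- the midpoint-circle octant loop of A (while x >= y: append (x, y); …)
-- fuel = (x + 1 - y).toNat bounds the remaining iterations (a totality guard only: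
-- the loop stops by itself when y > x, and fuel never runs out first)
def pvLoopA (fuel : Nat) (x y e : Int) : List (Int × Int) :=
  match fuel with
  | 0 => []
  | n + 1 =>
    if y ≤ x then
      (x, y) ::
        (if e < 0 then pvLoopA n x (y + 1) (e + 2 * (y + 1) - 1)
         else pvLoopA n (x - 1) (y + 1) (e + 2 * ((y + 1) - (x - 1)) - 1))
    else []

def calculateOutline (r : Int) : List (Int × Int) :=
  -- r = int(round(r)) is the identity on an int argument
  let points := pvLoopA (r + 1).toNat r 0 (1 - r)
  let points := points ++ (points.filter (fun p => decide (p.2 < p.1))).map (fun p => (p.2, p.1))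
  let points := points ++ (points.filter (fun p => !decide (p.1 = 0))).map (fun p => (-p.1, p.2))
  let points := points ++ (points.filter (fun p => !decide (p.2 = 0))).map (fun p => (p.1, -p.2))
  PySem.List.sorted2 points (fun p => p.1) (fun p => p.2)

-- ===== PORT B =====
-- the same midpoint-circle octant loop, as written in Source B
-- the same fuelled while loop, as written in Source B
def pvLoopB (fuel : Nat) (x y e : Int) : List (Int × Int) :=
  match fuel with
  | 0 => []
  | n + 1 =>
    if y ≤ x then
      (x, y) ::
        (if e < 0 then pvLoopB n x (y + 1) (e + 2 * (y + 1) - 1)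
         else pvLoopB n (x - 1) (y + 1) (e + 2 * ((y + 1) - (x - 1)) - 1))
    else []

-- the eight symmetric images of an octant point, in Source B's tuple order
def pvImages (p : Int × Int) : List (Int × Int) :=
  [(p.1, p.2), (p.2, p.1), (-p.1, p.2), (p.1, -p.2),
   (-p.1, -p.2), (-p.2, p.1), (p.2, -p.1), (-p.2, -p.1)]

def calculateOutline_alt (r : Int) : List (Int × Int) :=
  let pts := pvLoopB (r + 1).toNat r 0 (1 - r)
  let big := pts.flatMap pvImages
  let big := PySem.List.sorted2 big (fun p => p.1) (fun p => p.2)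
  -- result/last loop: keep each element that differs from its predecessor
  (big.foldl (fun st p => if st.2 = some p then st else (st.1 ++ [p], some p))
    (([] : List (Int × Int)), (none : Option (Int × Int)))).1

-- ===== PRECONDITION & SPEC =====
def Spec_calculateOutline (r : Int) (out : List (Int × Int)) : Prop := out = calculateOutline_alt r
instance (r : Int) (out : List (Int × Int)) : Decidable (Spec_calculateOutline r out) := by unfold Spec_calculateOutline; infer_instance

-- ===== CLAIM (what is proved, stated in full; the proofs are below) =====
def Claim_equal_calculateOutline : Prop := ∀ (r : Int), Dom_calculateOutline r → Spec_calculateOutline r (calculateOutline r)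

-- ===== LEMMAS AND PROOFS =====

theorem pvLoopB_eq_pvLoopA (fuel : Nat) : ∀ (x y e : Int), pvLoopB fuel x y e = pvLoopA fuel x y e := by
  induction fuel with
  | zero => intro x y e; rfl
  | succ n ih =>
      intro x y e
      rw [pvLoopB, pvLoopA]
      by_cases h1 : y ≤ x <;> by_cases he : e < 0 <;> simp [h1, he, ih]

-- every point of the octant list satisfies y ≤ p.2 ≤ p.1
theorem pvLoopA_bounds (fuel : Nat) :
    ∀ (x y e : Int), ∀ p ∈ pvLoopA fuel x y e, y ≤ p.2 ∧ p.2 ≤ p.1 := by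
  induction fuel with
  | zero => intro x y e p hp; simp [pvLoopA] at hp
  | succ n ih =>
      intro x y e p hp
      rw [pvLoopA] at hp
      by_cases h1 : y ≤ x
      · rw [if_pos h1] at hp
        rcases List.mem_cons.mp hp with rfl | hp'
        · omega
        · by_cases he : e < 0
          · rw [if_pos he] at hp'; have := ih x (y + 1) _ p hp'; omega
          · rw [if_neg he] at hp'; have := ih (x - 1) (y + 1) _ p hp'; omega
      · rw [if_neg h1] at hp; simp at hp

-- second coordinates strictly increase along the octant list
theorem pvLoopA_pairwise (fuel : Nat) :
    ∀ (x y e : Int), (pvLoopA fuel x y e).Pairwise (fun p q => p.2 < q.2) := by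
  induction fuel with
  | zero => intro x y e; simp [pvLoopA]
  | succ n ih =>
      intro x y e
      rw [pvLoopA]
      by_cases h1 : y ≤ x
      · rw [if_pos h1]
        by_cases he : e < 0
        · rw [if_pos he]
          refine List.Pairwise.cons ?_ (ih x (y + 1) _)
          intro q hq
          have := pvLoopA_bounds n x (y + 1) _ q hq
          simp only; omega
        · rw [if_neg he]
          refine List.Pairwise.cons ?_ (ih (x - 1) (y + 1) _)
          intro q hq
          have := pvLoopA_bounds n (x - 1) (y + 1) _ q hq
          simp only; omega
      · rw [if_neg h1]; simp

-- A's three reflection passes, as standalone list transformers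
def pvRefl1 (L : List (Int × Int)) : List (Int × Int) :=
  L ++ (L.filter (fun p => decide (p.2 < p.1))).map (fun p => (p.2, p.1))
def pvRefl2 (L : List (Int × Int)) : List (Int × Int) :=
  L ++ (L.filter (fun p => !decide (p.1 = 0))).map (fun p => (-p.1, p.2))
def pvRefl3 (L : List (Int × Int)) : List (Int × Int) :=
  L ++ (L.filter (fun p => !decide (p.2 = 0))).map (fun p => (p.1, -p.2))

theorem pvMem_refl1 (L : List (Int × Int)) (q : Int × Int) :
    q ∈ pvRefl1 L ↔ q ∈ L ∨ ∃ p ∈ L, p.2 < p.1 ∧ q = (p.2, p.1) := by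
  unfold pvRefl1
  simp only [List.mem_append, List.mem_map, List.mem_filter, decide_eq_true_eq]
  constructor
  · rintro (h | ⟨p, ⟨hp, hlt⟩, rfl⟩)
    · exact Or.inl h
    · exact Or.inr ⟨p, hp, hlt, rfl⟩
  · rintro (h | ⟨p, hp, hlt, rfl⟩)
    · exact Or.inl h
    · exact Or.inr ⟨p, ⟨hp, hlt⟩, rfl⟩

theorem pvMem_refl2 (L : List (Int × Int)) (q : Int × Int) :
    q ∈ pvRefl2 L ↔ q ∈ L ∨ ∃ p ∈ L, p.1 ≠ 0 ∧ q = (-p.1, p.2) := by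
  unfold pvRefl2
  simp only [List.mem_append, List.mem_map, List.mem_filter,
    Bool.not_eq_eq_eq_not, Bool.not_true, decide_eq_false_iff_not]
  constructor
  · rintro (h | ⟨p, ⟨hp, hne⟩, rfl⟩)
    · exact Or.inl h
    · exact Or.inr ⟨p, hp, hne, rfl⟩
  · rintro (h | ⟨p, hp, hne, rfl⟩)
    · exact Or.inl h
    · exact Or.inr ⟨p, ⟨hp, hne⟩, rfl⟩

theorem pvMem_refl3 (L : List (Int × Int)) (q : Int × Int) :
    q ∈ pvRefl3 L ↔ q ∈ L ∨ ∃ p ∈ L, p.2 ≠ 0 ∧ q = (p.1, -p.2) := by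
  unfold pvRefl3
  simp only [List.mem_append, List.mem_map, List.mem_filter,
    Bool.not_eq_eq_eq_not, Bool.not_true, decide_eq_false_iff_not]
  constructor
  · rintro (h | ⟨p, ⟨hp, hne⟩, rfl⟩)
    · exact Or.inl h
    · exact Or.inr ⟨p, hp, hne, rfl⟩
  · rintro (h | ⟨p, hp, hne, rfl⟩)
    · exact Or.inl h
    · exact Or.inr ⟨p, ⟨hp, hne⟩, rfl⟩

theorem pvNodup_refl1 (L : List (Int × Int)) (hnd : L.Nodup)
    (hb : ∀ p ∈ L, 0 ≤ p.2 ∧ p.2 ≤ p.1) : (pvRefl1 L).Nodup := by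
  unfold pvRefl1
  rw [List.nodup_append]
  refine ⟨hnd, ?_, ?_⟩
  · refine List.Nodup.map ?_ (hnd.filter _)
    rintro ⟨a, b⟩ ⟨c, d⟩ h
    simp only [Prod.mk.injEq] at h ⊢
    exact ⟨h.2, h.1⟩
  · intro q hq q' hq'
    simp only [List.mem_map, List.mem_filter, decide_eq_true_eq] at hq'
    obtain ⟨p, ⟨hp, hlt⟩, rfl⟩ := hq'
    have h1 := hb q hq
    intro hc
    rw [hc] at h1
    simp only at h1
    omega

theorem pvBounds_refl1 (L : List (Int × Int)) (hb : ∀ p ∈ L, 0 ≤ p.2 ∧ p.2 ≤ p.1) :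
    ∀ q ∈ pvRefl1 L, 0 ≤ q.1 ∧ 0 ≤ q.2 := by
  intro q hq
  rw [pvMem_refl1] at hq
  rcases hq with h | ⟨p, hp, hlt, rfl⟩
  · have := hb q h; omega
  · have := hb p hp; simp only; omega

theorem pvNodup_refl2 (L : List (Int × Int)) (hnd : L.Nodup)
    (hb : ∀ p ∈ L, 0 ≤ p.1) : (pvRefl2 L).Nodup := by
  unfold pvRefl2
  rw [List.nodup_append]
  refine ⟨hnd, ?_, ?_⟩
  · refine List.Nodup.map ?_ (hnd.filter _)
    rintro ⟨a, b⟩ ⟨c, d⟩ h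
    simp only [Prod.mk.injEq] at h ⊢
    exact ⟨by omega, h.2⟩
  · intro q hq q' hq'
    simp only [List.mem_map, List.mem_filter,
      Bool.not_eq_eq_eq_not, Bool.not_true, decide_eq_false_iff_not] at hq'
    obtain ⟨p, ⟨hp, hne⟩, rfl⟩ := hq'
    have h1 := hb q hq
    have h2 := hb p hp
    intro hc
    rw [hc] at h1
    simp only at h1
    omega

theorem pvBounds_refl2 (L : List (Int × Int)) (hb : ∀ p ∈ L, 0 ≤ p.2) :
    ∀ q ∈ pvRefl2 L, 0 ≤ q.2 := by
  intro q hq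
  rw [pvMem_refl2] at hq
  rcases hq with h | ⟨p, hp, hne, rfl⟩
  · exact hb q h
  · exact hb p hp

theorem pvNodup_refl3 (L : List (Int × Int)) (hnd : L.Nodup)
    (hb : ∀ p ∈ L, 0 ≤ p.2) : (pvRefl3 L).Nodup := by
  unfold pvRefl3
  rw [List.nodup_append]
  refine ⟨hnd, ?_, ?_⟩
  · refine List.Nodup.map ?_ (hnd.filter _)
    rintro ⟨a, b⟩ ⟨c, d⟩ h
    simp only [Prod.mk.injEq] at h ⊢
    exact ⟨h.1, by omega⟩
  · intro q hq q' hq'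
    simp only [List.mem_map, List.mem_filter,
      Bool.not_eq_eq_eq_not, Bool.not_true, decide_eq_false_iff_not] at hq'
    obtain ⟨p, ⟨hp, hne⟩, rfl⟩ := hq'
    have h1 := hb q hq
    have h2 := hb p hp
    intro hc
    rw [hc] at h1
    simp only at h1
    omega

theorem pvRefl1_of_mem (L : List (Int × Int)) (p : Int × Int) (hp : p ∈ L)
    (hb : p.2 ≤ p.1) : p ∈ pvRefl1 L ∧ (p.2, p.1) ∈ pvRefl1 L := by
  rw [pvMem_refl1, pvMem_refl1]
  refine ⟨Or.inl hp, ?_⟩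
  by_cases h : p.2 < p.1
  · exact Or.inr ⟨p, hp, h, rfl⟩
  · have he : (p.2, p.1) = p := by
      obtain ⟨a, b⟩ := p
      simp only at hb h ⊢
      simp only [Prod.mk.injEq]
      omega
    rw [he]
    exact Or.inl hp

theorem pvRefl2_of_mem (L : List (Int × Int)) (q : Int × Int) (hq : q ∈ L) :
    q ∈ pvRefl2 L ∧ (-q.1, q.2) ∈ pvRefl2 L := by
  rw [pvMem_refl2, pvMem_refl2]
  refine ⟨Or.inl hq, ?_⟩
  by_cases h : q.1 = 0
  · have he : (-q.1, q.2) = q := by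
      obtain ⟨a, b⟩ := q
      simp_all
    rw [he]
    exact Or.inl hq
  · exact Or.inr ⟨q, hq, h, rfl⟩

theorem pvRefl3_of_mem (L : List (Int × Int)) (q : Int × Int) (hq : q ∈ L) :
    q ∈ pvRefl3 L ∧ (q.1, -q.2) ∈ pvRefl3 L := by
  rw [pvMem_refl3, pvMem_refl3]
  refine ⟨Or.inl hq, ?_⟩
  by_cases h : q.2 = 0
  · have he : (q.1, -q.2) = q := by
      obtain ⟨a, b⟩ := q
      simp_all
    rw [he]
    exact Or.inl hq
  · exact Or.inr ⟨q, hq, h, rfl⟩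

-- A's fully reflected list holds exactly the eight symmetric images of the octant points
theorem pvMem_full (L : List (Int × Int)) (hb : ∀ p ∈ L, 0 ≤ p.2 ∧ p.2 ≤ p.1) (q : Int × Int) :
    q ∈ pvRefl3 (pvRefl2 (pvRefl1 L)) ↔ ∃ p ∈ L, q ∈ pvImages p := by
  constructor
  · intro hq
    rw [pvMem_refl3] at hq
    have step1 : ∀ w : Int × Int, w ∈ pvRefl1 L → ∃ p ∈ L, w ∈ pvImages p := by
      intro w hw
      rw [pvMem_refl1] at hw
      rcases hw with h | ⟨p, hp, _, rfl⟩
      · exact ⟨w, h, by simp [pvImages]⟩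
      · exact ⟨p, hp, by simp [pvImages]⟩
    have step2 : ∀ z : Int × Int, z ∈ pvRefl2 (pvRefl1 L) → ∃ p ∈ L, z ∈ pvImages p := by
      intro z hz
      rw [pvMem_refl2] at hz
      rcases hz with h | ⟨w, hw, _, rfl⟩
      · exact step1 z h
      · obtain ⟨p, hp, hi⟩ := step1 w hw
        refine ⟨p, hp, ?_⟩
        simp only [pvImages, List.mem_cons, List.not_mem_nil, or_false] at hi ⊢
        rcases hi with h|h|h|h|h|h|h|h <;> rw [h] <;> simp
    rcases hq with h | ⟨z, hz, _, rfl⟩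
    · exact step2 q h
    · obtain ⟨p, hp, hi⟩ := step2 z hz
      refine ⟨p, hp, ?_⟩
      simp only [pvImages, List.mem_cons, List.not_mem_nil, or_false] at hi ⊢
      rcases hi with h|h|h|h|h|h|h|h <;> rw [h] <;> simp
  · rintro ⟨p, hp, hi⟩
    have hbp := hb p hp
    have h1 := pvRefl1_of_mem L p hp hbp.2
    have h2a := pvRefl2_of_mem (pvRefl1 L) p h1.1
    have h2b := pvRefl2_of_mem (pvRefl1 L) (p.2, p.1) h1.2
    have h3a := pvRefl3_of_mem _ p h2a.1
    have h3b := pvRefl3_of_mem _ (-p.1, p.2) h2a.2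
    have h3c := pvRefl3_of_mem _ (p.2, p.1) h2b.1
    have h3d := pvRefl3_of_mem _ (-p.2, p.1) h2b.2
    simp only [pvImages, List.mem_cons, List.not_mem_nil, or_false] at hi
    obtain ⟨a, b⟩ := p
    simp only at hbp h3a h3b h3c h3d
    rcases hi with h|h|h|h|h|h|h|h <;> subst h
    · exact h3a.1
    · exact h3c.1
    · exact h3b.1
    · exact h3a.2
    · exact h3b.2
    · exact h3d.1
    · exact h3c.2
    · exact h3d.2

-- Python's lexicographic order on int pairs, and the Boolean comparison sorted2 uses
def pvLex (p q : Int × Int) : Prop := p.1 < q.1 ∨ (p.1 = q.1 ∧ p.2 < q.2)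
def pvLexb (a b : Int × Int) : Bool :=
  decide (a.1 < b.1) || (!decide (b.1 < a.1) && decide (a.2 < b.2))
def pvLE (a b : Int × Int) : Prop := ¬ pvLex b a

theorem pvLexb_iff (a b : Int × Int) : pvLexb a b = true ↔ pvLex a b := by
  unfold pvLexb pvLex
  simp only [Bool.or_eq_true, Bool.and_eq_true, Bool.not_eq_eq_eq_not, Bool.not_true,
    decide_eq_true_eq, decide_eq_false_iff_not]
  omega

theorem pvLex_total (a b : Int × Int) (h : a ≠ b) : pvLex a b ∨ pvLex b a := by
  unfold pvLex
  by_contra hc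
  push Not at hc
  apply h
  obtain ⟨x, y⟩ := a; obtain ⟨u, v⟩ := b
  simp only [Prod.mk.injEq] at *
  omega

theorem pvLex_trans (a b c : Int × Int) (h1 : pvLex a b) (h2 : pvLex b c) : pvLex a c := by
  unfold pvLex at *
  omega

theorem pvLex_asymm (a b : Int × Int) (h : pvLex a b) : ¬ pvLex b a := by
  unfold pvLex at *
  omega

theorem pvLE_antisymm (a b : Int × Int) (h1 : pvLE a b) (h2 : pvLE b a) : a = b := by
  by_contra h
  rcases pvLex_total a b h with hx | hx
  · exact h2 hx
  · exact h1 hx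

theorem pvInsertBy_pairwise_le (x : Int × Int) :
    ∀ (acc : List (Int × Int)), acc.Pairwise pvLE →
      (PySem.List.insertBy pvLexb x acc).Pairwise pvLE := by
  intro acc
  induction acc with
  | nil => intro _; simp [PySem.List.insertBy, pvLE]
  | cons y t ih =>
      intro hpw
      rw [PySem.List.insertBy]
      rcases List.pairwise_cons.mp hpw with ⟨hyt, hpt⟩
      by_cases hb : pvLexb x y = true
      · rw [if_pos hb]
        have hxy : pvLex x y := (pvLexb_iff x y).mp hb
        refine List.Pairwise.cons ?_ hpw
        intro z hz
        rcases List.mem_cons.mp hz with rfl | hz'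
        · exact pvLex_asymm x z hxy
        · intro hzx
          exact hyt z hz' (pvLex_trans z x y hzx hxy)
      · rw [if_neg hb]
        refine List.Pairwise.cons ?_ (ih hpt)
        intro z hz
        rcases (PySem.List.mem_insertBy pvLexb x z t).mp hz with hzx | hz'
        · subst hzx
          exact fun hxy => hb ((pvLexb_iff z y).mpr hxy)
        · exact hyt z hz'

theorem pvFoldl_insertBy_pairwise_le :
    ∀ (xs acc : List (Int × Int)), acc.Pairwise pvLE →
      (List.foldl (fun acc x => PySem.List.insertBy pvLexb x acc) acc xs).Pairwise pvLE := by
  intro xs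
  induction xs with
  | nil => intro acc h; simpa using h
  | cons x t ih =>
      intro acc hpw
      simp only [List.foldl_cons]
      exact ih _ (pvInsertBy_pairwise_le x acc hpw)

theorem pvSorted2_unfold (zs : List (Int × Int)) :
    PySem.List.sorted2 zs (fun p => p.1) (fun p => p.2) =
      List.foldl (fun acc x => PySem.List.insertBy pvLexb x acc) [] zs := rfl

theorem pvSorted2_pairwise_le (zs : List (Int × Int)) :
    (PySem.List.sorted2 zs (fun p => p.1) (fun p => p.2)).Pairwise pvLE := by
  rw [pvSorted2_unfold]
  exact pvFoldl_insertBy_pairwise_le zs [] (by simp)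

-- the adjacent-duplicate scan of B's final loop, with `last` as explicit state
def pvDA (last : Option (Int × Int)) (ys : List (Int × Int)) : List (Int × Int) :=
  match ys with
  | [] => []
  | p :: t => if last = some p then pvDA last t else p :: pvDA (some p) t

theorem pvScan_eq_pvDA :
    ∀ (ys : List (Int × Int)) (acc : List (Int × Int)) (last : Option (Int × Int)),
      (ys.foldl (fun st p => if st.2 = some p then st else (st.1 ++ [p], some p))
        (acc, last)).1 = acc ++ pvDA last ys := by
  intro ys
  induction ys with
  | nil => intro acc last; simp [pvDA]
  | cons p t ih =>
      intro acc last
      rw [pvDA]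
      simp only [List.foldl_cons]
      by_cases h : last = some p
      · have e : (if (acc, last).2 = some p then (acc, last)
            else ((acc, last).1 ++ [p], some p)) = (acc, last) := by simp [h]
        rw [e, if_pos h, ih]
      · have e : (if (acc, last).2 = some p then (acc, last)
            else ((acc, last).1 ++ [p], some p)) = (acc ++ [p], some p) := by simp [h]
        rw [e, if_neg h, ih]
        simp

theorem pvDA_mem :
    ∀ (ys : List (Int × Int)) (last : Option (Int × Int)), ys.Pairwise pvLE →
      (∀ q, last = some q → ∀ s ∈ ys, pvLE q s) →
      ∀ r, (r ∈ pvDA last ys ↔ r ∈ ys ∧ last ≠ some r) := by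
  intro ys
  induction ys with
  | nil => intro last _ _ r; simp [pvDA]
  | cons p t ih =>
      intro last hpw hlast r
      rcases List.pairwise_cons.mp hpw with ⟨hpt, htw⟩
      have hnext : ∀ q, some p = some q → ∀ s ∈ t, pvLE q s := by
        rintro q hq s hs
        injection hq with hq
        subst hq
        exact hpt s hs
      rw [pvDA]
      by_cases h : last = some p
      · rw [if_pos h, h, ih (some p) htw hnext r]
        simp only [List.mem_cons, ne_eq, Option.some.injEq]
        constructor
        · rintro ⟨h1, h2⟩
          exact ⟨Or.inr h1, h2⟩
        · rintro ⟨h1 | h1, h2⟩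
          · exact absurd h1.symm h2
          · exact ⟨h1, h2⟩
      · rw [if_neg h, List.mem_cons, ih (some p) htw hnext r]
        constructor
        · rintro (rfl | ⟨h1, h2⟩)
          · exact ⟨List.mem_cons_self, fun hc => h hc⟩
          · refine ⟨List.mem_cons_of_mem p h1, ?_⟩
            rintro rfl
            have hq1 : pvLE r p := hlast r rfl p List.mem_cons_self
            have hq2 : pvLE p r := hpt r h1
            have : r = p := pvLE_antisymm r p hq1 hq2
            exact h (by rw [this])
        · rintro ⟨h1, h2⟩
          rcases List.mem_cons.mp h1 with hrp | h1'
          · exact Or.inl hrp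
          · by_cases hrp : r = p
            · exact Or.inl hrp
            · exact Or.inr ⟨h1', fun hc => hrp (Option.some.inj hc).symm⟩

theorem pvDA_pairwise :
    ∀ (ys : List (Int × Int)) (last : Option (Int × Int)), ys.Pairwise pvLE →
      (∀ q, last = some q → ∀ s ∈ ys, pvLE q s) →
      (pvDA last ys).Pairwise pvLex := by
  intro ys
  induction ys with
  | nil => intro last _ _; simp [pvDA]
  | cons p t ih =>
      intro last hpw hlast
      rcases List.pairwise_cons.mp hpw with ⟨hpt, htw⟩
      have hnext : ∀ q, some p = some q → ∀ s ∈ t, pvLE q s := by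
        rintro q hq s hs; injection hq with hq; subst hq; exact hpt s hs
      rw [pvDA]
      by_cases h : last = some p
      · rw [if_pos h]
        subst h
        exact ih (some p) htw hnext
      · rw [if_neg h]
        refine List.Pairwise.cons ?_ (ih (some p) htw hnext)
        intro z hz
        rw [pvDA_mem t (some p) htw hnext z] at hz
        obtain ⟨hz1, hz2⟩ := hz
        have hne : p ≠ z := fun hc => hz2 (by rw [hc])
        rcases pvLex_total p z hne with hx | hx
        · exact hx
        · exact absurd hx (hpt z hz1)

theorem pvInsertBy_pairwise (x : Int × Int) :
    ∀ (acc : List (Int × Int)), acc.Pairwise pvLex → x ∉ acc →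
      (PySem.List.insertBy pvLexb x acc).Pairwise pvLex := by
  intro acc
  induction acc with
  | nil => intro _ _; simp [PySem.List.insertBy]
  | cons y t ih =>
      intro hpw hx
      rw [PySem.List.insertBy]
      rcases List.pairwise_cons.mp hpw with ⟨hyt, hpt⟩
      by_cases hb : pvLexb x y = true
      · rw [if_pos hb]
        refine List.Pairwise.cons ?_ hpw
        intro z hz
        rcases List.mem_cons.mp hz with rfl | hz'
        · exact (pvLexb_iff x z).mp hb
        · exact pvLex_trans x y z ((pvLexb_iff x y).mp hb) (hyt z hz')
      · rw [if_neg hb]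
        refine List.Pairwise.cons ?_ (ih hpt (fun h => hx (List.mem_cons_of_mem y h)))
        intro z hz
        rcases (PySem.List.mem_insertBy pvLexb x z t).mp hz with rfl | hz'
        · have hne : y ≠ z := fun h => hx (by rw [h]; exact List.mem_cons_self)
          rcases pvLex_total y z hne with h | h
          · exact h
          · exact absurd ((pvLexb_iff z y).mpr h) hb
        · exact hyt z hz'

theorem pvFoldl_insertBy_pairwise :
    ∀ (xs acc : List (Int × Int)), xs.Nodup → acc.Pairwise pvLex →
      (∀ p ∈ xs, p ∉ acc) →
      (List.foldl (fun acc x => PySem.List.insertBy pvLexb x acc) acc xs).Pairwise pvLex := by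
  intro xs
  induction xs with
  | nil => intro acc _ h _; simpa using h
  | cons x t ih =>
      intro acc hnd hpw hdisj
      simp only [List.foldl_cons]
      have hx : x ∉ acc := hdisj x List.mem_cons_self
      refine ih _ (List.nodup_cons.mp hnd).2 (pvInsertBy_pairwise x acc hpw hx) ?_
      intro p hp hmem
      rcases (PySem.List.mem_insertBy pvLexb x p acc).mp hmem with rfl | h'
      · exact (List.nodup_cons.mp hnd).1 hp
      · exact hdisj p (List.mem_cons_of_mem x hp) h'

theorem pvSorted2_pairwise (zs : List (Int × Int)) (h : zs.Nodup) :
    (PySem.List.sorted2 zs (fun p => p.1) (fun p => p.2)).Pairwise pvLex := by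
  rw [pvSorted2_unfold]
  exact pvFoldl_insertBy_pairwise zs [] h (by simp) (by simp)


-- ===== VERDICT (by name: the statement is the Claim_ definition above) =====
theorem calculateOutline_spec : Claim_equal_calculateOutline := by
  unfold Claim_equal_calculateOutline Spec_calculateOutline
  intro r _
  have hb : ∀ p ∈ pvLoopA (r + 1).toNat r 0 (1 - r), 0 ≤ p.2 ∧ p.2 ≤ p.1 := by
    intro p hp
    have := pvLoopA_bounds (r + 1).toNat r 0 (1 - r) p hp
    omega
  have hnd : (pvLoopA (r + 1).toNat r 0 (1 - r)).Nodup := by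
    refine (pvLoopA_pairwise (r + 1).toNat r 0 (1 - r)).imp ?_
    intro p q hlt heq
    rw [heq] at hlt
    omega
  have hA : calculateOutline r =
      PySem.List.sorted2 (pvRefl3 (pvRefl2 (pvRefl1 (pvLoopA (r + 1).toNat r 0 (1 - r)))))
        (fun p => p.1) (fun p => p.2) := rfl
  have hB : calculateOutline_alt r =
      pvDA none (PySem.List.sorted2 ((pvLoopA (r + 1).toNat r 0 (1 - r)).flatMap pvImages)
        (fun p => p.1) (fun p => p.2)) := by
    rw [calculateOutline_alt, pvLoopB_eq_pvLoopA]
    rw [pvScan_eq_pvDA]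
    simp
  rw [hA, hB]
  -- names for the two sides
  have hLE := pvSorted2_pairwise_le ((pvLoopA (r + 1).toNat r 0 (1 - r)).flatMap pvImages)
  have hvac : ∀ q : Int × Int, (none : Option (Int × Int)) = some q →
      ∀ s ∈ PySem.List.sorted2 ((pvLoopA (r + 1).toNat r 0 (1 - r)).flatMap pvImages)
        (fun p => p.1) (fun p => p.2), pvLE q s := by
    intro q hq
    exact absurd hq (by simp)
  have hndL3 : (pvRefl3 (pvRefl2 (pvRefl1 (pvLoopA (r + 1).toNat r 0 (1 - r))))).Nodup := by
    refine pvNodup_refl3 _ (pvNodup_refl2 _ (pvNodup_refl1 _ hnd hb) ?_) ?_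
    · intro q hq
      exact (pvBounds_refl1 _ hb q hq).1
    · refine pvBounds_refl2 _ ?_
      intro q hq
      exact (pvBounds_refl1 _ hb q hq).2
  have hpwS := pvSorted2_pairwise _ hndL3
  have hpwR := pvDA_pairwise _ none hLE hvac
  have hmem : ∀ a, a ∈ PySem.List.sorted2
      (pvRefl3 (pvRefl2 (pvRefl1 (pvLoopA (r + 1).toNat r 0 (1 - r)))))
        (fun p => p.1) (fun p => p.2) ↔
      a ∈ pvDA none (PySem.List.sorted2 ((pvLoopA (r + 1).toNat r 0 (1 - r)).flatMap pvImages)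
        (fun p => p.1) (fun p => p.2)) := by
    intro a
    rw [pvDA_mem _ none hLE hvac a]
    rw [(PySem.List.sorted2_perm _ _ _ false).mem_iff,
      (PySem.List.sorted2_perm _ _ _ false).mem_iff]
    rw [pvMem_full _ hb a, List.mem_flatMap]
    simp
  have hperm : (PySem.List.sorted2
      (pvRefl3 (pvRefl2 (pvRefl1 (pvLoopA (r + 1).toNat r 0 (1 - r)))))
        (fun p => p.1) (fun p => p.2)).Perm
      (pvDA none (PySem.List.sorted2 ((pvLoopA (r + 1).toNat r 0 (1 - r)).flatMap pvImages)
        (fun p => p.1) (fun p => p.2))) := by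
    refine (List.perm_ext_iff_of_nodup ?_ ?_).mpr hmem
    · exact hpwS.imp (fun hlt heq => by rw [heq] at hlt; exact pvLex_asymm _ _ hlt hlt)
    · exact hpwR.imp (fun hlt heq => by rw [heq] at hlt; exact pvLex_asymm _ _ hlt hlt)
  refine hperm.eq_of_pairwise ?_ hpwS hpwR
  intro a b _ _ h1 h2
  exact absurd h2 (pvLex_asymm a b h1)
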